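-- pv_equiv track=rewrite | github.com/miliar/Code_Jam_Webscraper | solutions_python/Problem_96/611.py | calc_n_over
-- ===== SOURCE A (Python) =====
-- def calc_best_common(T):
-- 	"""
-- 	Return the Best values associated and if it is useful for a surprise
-- 	"""
-- 	# Normal T = 3*b + d
-- 	[b,d] = divmod(T,3)
-- 	return (b + min(d,1), d!=1)
--
-- def calc_n_over(Tlist, B, S):
-- 	"""
-- 	Return the number of elements with best equal or higher to B
-- 	"""
--
-- 	res = 0
-- 	for T in Tlist:
-- 		Bn, use = calc_best_common(T)
-- 		if Bn>=B:
-- 			res += 1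
-- 			continue
--
-- 		# For too small T there is no option for the surprise
-- 		if T<2:
-- 			continue
-- 		# Consider it as a surprise result
-- 		if use and S>0 and Bn+1>=B:
-- 			S -= 1
-- 			res += 1
-- 	return res
-- ===== SOURCE B (Python) =====
-- def calc_n_over(Tlist, B, S):
--     # Frequency table + closed-form window: best(T) = ceil(T/3) >= B iff T >= 3*B - 2,
--     # and a surprise helps exactly for T in {3*B - 4, 3*B - 3} (with T >= 2).
--     freq = {}
--     for T in Tlist:
--         freq[T] = freq.get(T, 0) + 1
--     lo = 3 * B - 2
--     reached = sum(c for T, c in freq.items() if T >= lo)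
--     eligible = sum(freq.get(v, 0) for v in (lo - 2, lo - 1) if v >= 2)
--     return reached + min(max(S, 0), eligible)
-- ===== Notes on version B (the rewrite author's own statement) =====
-- stated objective: alternative
-- what changed: B drops A's per-element divmod classification and greedy in-loop budget spending: it builds a frequency dict of Tlist once, counts 'reached' by the closed-form threshold T >= 3*B-2 over the dict items, reads the surprise-eligible count off the dict at the two window values 3*B-4 and 3*B-3 (when >= 2), and returns reached + min(max(S,0), eligible).
import Mathlib
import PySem

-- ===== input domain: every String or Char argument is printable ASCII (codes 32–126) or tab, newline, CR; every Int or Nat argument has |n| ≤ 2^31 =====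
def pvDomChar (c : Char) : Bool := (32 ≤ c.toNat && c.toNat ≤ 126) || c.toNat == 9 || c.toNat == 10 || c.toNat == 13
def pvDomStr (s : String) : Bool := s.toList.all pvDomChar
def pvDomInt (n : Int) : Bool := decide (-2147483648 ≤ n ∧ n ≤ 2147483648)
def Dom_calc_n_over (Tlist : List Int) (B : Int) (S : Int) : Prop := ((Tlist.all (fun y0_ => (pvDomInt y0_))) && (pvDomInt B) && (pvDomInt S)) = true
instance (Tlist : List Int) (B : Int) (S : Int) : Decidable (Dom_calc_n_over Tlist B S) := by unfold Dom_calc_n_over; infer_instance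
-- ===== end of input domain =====

-- B replaces A's greedy per-element divmod classification and in-loop budget spending by a frequency table
-- plus a closed-form threshold window: reached ⇔ T ≥ 3B-2, surprise-eligible ⇔ T ∈ {3B-4, 3B-3} ∧ T ≥ 2.


-- ===== PORT A =====
def calc_best_common (T : Int) : Int × Bool :=
  let b := PySem.Int.floordiv T 3
  let d := PySem.Int.mod T 3
  (b + min d 1, d != 1)

def calcLoopA (B : Int) : List Int → Int → Int → Int
  | [], _, res => res
  | T :: rest, S, res =>
    let Bn := (calc_best_common T).1
    let use := (calc_best_common T).2
    if Bn ≥ B then calcLoopA B rest S (res + 1)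
    else if T < 2 then calcLoopA B rest S res
    else if use = true ∧ S > 0 ∧ Bn + 1 ≥ B then calcLoopA B rest (S - 1) (res + 1)
    else calcLoopA B rest S res

def calc_n_over (Tlist : List Int) (B : Int) (S : Int) : Int :=
  calcLoopA B Tlist S 0

-- ===== PORT B =====
-- frequency dict, then closed-form threshold window
def calc_n_over_alt (Tlist : List Int) (B : Int) (S : Int) : Int :=
  let freq := Tlist.foldl (fun d T => d.insert T (d.getD T 0 + 1)) PySem.Dict.empty
  let lo := 3 * B - 2
  let reached := freq.items.foldl (fun acc p => if p.1 ≥ lo then acc + p.2 else acc) 0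
  let eligible := [lo - 2, lo - 1].foldl (fun acc v => if v ≥ 2 then acc + freq.getD v 0 else acc) 0
  reached + min (max S 0) eligible

-- ===== PRECONDITION & SPEC =====
def Spec_calc_n_over (Tlist : List Int) (B : Int) (S : Int) (out : Int) : Prop := out = calc_n_over_alt Tlist B S
instance (Tlist : List Int) (B : Int) (S : Int) (out : Int) : Decidable (Spec_calc_n_over Tlist B S out) := by unfold Spec_calc_n_over; infer_instance

-- ===== CLAIM (what is proved, stated in full; the proofs are below) =====
def Claim_equal_calc_n_over : Prop := ∀ (Tlist : List Int) (B : Int) (S : Int), Dom_calc_n_over Tlist B S → Spec_calc_n_over Tlist B S (calc_n_over Tlist B S)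

-- ===== LEMMAS AND PROOFS =====

-- the closed-form predicates B's window encodes
def pReach (B T : Int) : Bool := decide (3 * B - 2 ≤ T)
def pElig (B T : Int) : Bool := decide ((T = 3 * B - 4 ∨ T = 3 * B - 3) ∧ 2 ≤ T)

theorem calcLoopA_eq (B : Int) (l : List Int) :
    ∀ (S res : Int),
      calcLoopA B l S res
        = res + (l.countP (pReach B) : Int) + min (max S 0) ((l.countP (pElig B)) : Int) := by
  induction l with
  | nil => intro S res; simp [calcLoopA]
  | cons T rest ih =>
    intro S res
    have hd0 : 0 ≤ PySem.Int.mod T 3 := PySem.Int.mod_nonneg T (by norm_num)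
    have hd3 : PySem.Int.mod T 3 < 3 := PySem.Int.mod_lt T (by norm_num)
    have heq : PySem.Int.floordiv T 3 * 3 + PySem.Int.mod T 3 = T :=
      PySem.Int.floordiv_mul_add_mod T 3
    simp only [calcLoopA, calc_best_common, List.countP_cons, pReach, pElig,
      bne_iff_ne, ne_eq]
    split_ifs with h1 h2 h3 <;> rw [ih] <;>
      (try simp only [decide_eq_true_eq] at *) <;> push_cast <;> omega

-- B's reached-sum over the counter items is the countP of the threshold predicate
theorem foldl_if_snd (lo : Int) (l : List (Int × Int)) :
    ∀ acc : Int,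
      l.foldl (fun acc p => if p.1 ≥ lo then acc + p.2 else acc) acc
        = acc + ((l.filter (fun p => p.1 ≥ lo)).map (·.2)).sum := by
  induction l with
  | nil => intro acc; simp
  | cons p rest ih =>
    intro acc
    by_cases h : p.1 ≥ lo <;> · simp [List.foldl_cons, h, ih]; try ring

theorem ofList_perm_dedup (xs : List Int) : (PySem.Set.ofList xs).Perm xs.dedup := by
  apply List.perm_of_nodup_nodup_toFinset_eq (PySem.Set.nodup_ofList xs) xs.nodup_dedup
  ext a
  simp [List.mem_toFinset, PySem.Set.mem_ofList, List.mem_dedup]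

theorem reached_eq (xs : List Int) (lo : Int) :
    ((PySem.Dict.counter xs).items.foldl (fun acc p => if p.1 ≥ lo then acc + p.2 else acc) 0)
      = (xs.countP (fun T => decide (lo ≤ T)) : Int) := by
  rw [foldl_if_snd, PySem.Dict.items_counter]
  have hperm : ((PySem.Set.ofList xs).filter (fun k => decide (lo ≤ k))).Perm
      (xs.dedup.filter (fun k => decide (lo ≤ k))) :=
    (ofList_perm_dedup xs).filter _
  have hmapperm := hperm.map (fun k => (xs.count k : Int))
  calc 0 + ((((PySem.Set.ofList xs).map fun k => (k, (xs.count k : Int))).filter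
        (fun p => p.1 ≥ lo)).map (·.2)).sum
      = (((PySem.Set.ofList xs).filter (fun k => decide (lo ≤ k))).map
          (fun k => (xs.count k : Int))).sum := by
        rw [List.filter_map, List.map_map]
        simp [Function.comp_def, ge_iff_le]
    _ = ((xs.dedup.filter (fun k => decide (lo ≤ k))).map (fun k => (xs.count k : Int))).sum :=
        hmapperm.sum_eq
    _ = (xs.countP (fun T => decide (lo ≤ T)) : Int) := by
        rw [← List.sum_map_count_dedup_filter_eq_countP (fun k => decide (lo ≤ k)) xs,
          Nat.cast_list_sum, List.map_map]
        rfl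

theorem countP_elig (B : Int) (xs : List Int) :
    ((xs.countP (pElig B)) : Int)
      = (if 3 * B - 2 - 2 ≥ 2 then (xs.count (3 * B - 2 - 2) : Int) else 0)
        + (if 3 * B - 2 - 1 ≥ 2 then (xs.count (3 * B - 2 - 1) : Int) else 0) := by
  induction xs with
  | nil => simp
  | cons T rest ih =>
    simp only [List.countP_cons, List.count_cons, pElig, decide_eq_true_eq, beq_iff_eq]
    split_ifs at ih ⊢ <;> push_cast at ih ⊢ <;> omega

-- ===== VERDICT (by name: the statement is the Claim_ definition above) =====
theorem calc_n_over_spec : Claim_equal_calc_n_over := by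
  intro Tlist B S _
  unfold Spec_calc_n_over calc_n_over calc_n_over_alt
  rw [PySem.Dict.foldl_insert_getD_add_one_eq_counter, calcLoopA_eq]
  simp only [List.foldl_cons, List.foldl_nil]
  rw [reached_eq, countP_elig]
  simp only [PySem.Dict.getD_counter,
    show (fun T => decide (3 * B - 2 ≤ T)) = pReach B from rfl]
  split_ifs <;> push_cast <;> omega
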